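-- pv_equiv track=rewrite | github.com/LCJ-Group/aitherhub | worker/batch/generate_dataset.py | check_product_in_text
-- ===== SOURCE A (Python) =====
-- def check_product_in_text(text_str: str, product_names: list) -> dict:
--     """Check if top product names appear in phase text (partial match)."""
--     if not text_str or not product_names:
--         return {"product_match": 0, "product_match_top3": 0, "matched_product_count": 0}
--
--     text_lower = text_str.lower()
--     matched = 0
--     matched_top3 = 0
--
--     for i, name in enumerate(product_names):
--         if not name:
--             continue
--         # Use first 6 chars for partial match (product names can be long)
--         short_name = name[:6].lower().strip()
--         if len(short_name) >= 2 and short_name in text_lower: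
--             matched += 1
--             if i < 3:
--                 matched_top3 = 1
--
--     return {
--         "product_match": 1 if matched > 0 else 0,
--         "product_match_top3": matched_top3,
--         "matched_product_count": matched,
--     }
-- ===== SOURCE B (Python) =====
-- def check_product_in_text(text_str: str, product_names: list) -> dict:
--     """Check if top product names appear in phase text (partial match)."""
--     if not text_str or not product_names:
--         return {"product_match": 0, "product_match_top3": 0, "matched_product_count": 0}
--
--     text_lower = text_str.lower()
--     n = len(text_lower)
--     # Index the text once: set of all substrings of length 2..6 (the only
--     # possible lengths of a stripped 6-char prefix that passes the >=2 check).
--     grams = set()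
--     for length in range(2, 7):
--         for i in range(n - length + 1):
--             grams.add(text_lower[i:i + length])
--
--     # Each product key is now a single O(1) set lookup.
--     keys = [name[:6].lower().strip() for name in product_names]
--     hit = [len(k) >= 2 and k in grams for k in keys]
--     matched = sum(hit)
--     matched_top3 = 1 if True in hit[:3] else 0
--
--     return {
--         "product_match": 1 if matched > 0 else 0,
--         "product_match_top3": matched_top3,
--         "matched_product_count": matched,
--     }
-- ===== Notes on version B (the rewrite author's own statement) =====
-- stated objective: faster
-- what changed: B builds a hash-set index of all length-2..6 substrings of the lowered text once, turning A's per-product 'prefix in text' scan into an O(1) set lookup per product, so the inner substring search over the text disappears.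
import Mathlib
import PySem

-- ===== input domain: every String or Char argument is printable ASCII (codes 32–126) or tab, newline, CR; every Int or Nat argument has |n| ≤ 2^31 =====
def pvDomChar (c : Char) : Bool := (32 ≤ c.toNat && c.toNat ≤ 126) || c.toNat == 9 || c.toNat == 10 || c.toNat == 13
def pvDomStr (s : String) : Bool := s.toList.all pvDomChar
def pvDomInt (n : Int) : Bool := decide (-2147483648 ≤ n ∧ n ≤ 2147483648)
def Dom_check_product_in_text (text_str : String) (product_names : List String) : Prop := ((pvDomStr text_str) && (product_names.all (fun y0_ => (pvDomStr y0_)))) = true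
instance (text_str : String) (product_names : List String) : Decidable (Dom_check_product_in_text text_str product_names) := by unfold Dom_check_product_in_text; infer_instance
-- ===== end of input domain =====

-- B replaces A's per-pattern substring scan of the text by a substring index: the set of
-- all length-2..6 substrings of the lowered text, built once, so every product key
-- becomes a single set lookup; objective: faster for many products.

-- ===== PORT A =====
def check_product_in_text (text_str : String) (product_names : List String) : List (String × Int) :=
  if text_str = "" ∨ product_names = [] then
    [("product_match", 0), ("product_match_top3", 0), ("matched_product_count", 0)]
  else
    let text_lower := PySem.Str.lower text_str
    let st := (PySem.List.enumerate product_names 0).foldl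
      (fun (acc : Int × Int) p =>
        if p.2 = "" then acc
        else
          let short_name := PySem.Str.strip (PySem.Str.lower (PySem.Str.slice p.2 none (some 6)))
          if 2 ≤ PySem.Str.len short_name ∧ PySem.Str.isIn short_name text_lower = true then
            (acc.1 + 1, if p.1 < 3 then 1 else acc.2)
          else acc) (0, 0)
    [("product_match", if st.1 > 0 then 1 else 0),
     ("product_match_top3", st.2),
     ("matched_product_count", st.1)]

-- ===== PORT B =====
-- all substrings text_lower[i:i+length] for length in range(2,7), i in range(n-length+1), as a set
def pvGrams (tl : List Char) : PySem.Set (List Char) :=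
  (PySem.List.pyRange 2 7 1).foldl (fun g len =>
    (PySem.List.pyRange 0 ((tl.length : Int) - len + 1) 1).foldl (fun g i =>
      PySem.Set.add g (PySem.List.slice tl (some i) (some (i + len)))) g)
    PySem.Set.empty

-- key = name[:6].lower().strip() (on code points)
def pvKey (name : String) : List Char :=
  PySem.Chars.strip (PySem.Chars.lower (PySem.Chars.slice name.toList none (some 6)))

def pvHit (grams : PySem.Set (List Char)) (k : List Char) : Bool :=
  decide (2 ≤ k.length) && PySem.Set.contains grams k

def check_product_in_text_alt (text_str : String) (product_names : List String) : List (String × Int) :=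
  if text_str = "" ∨ product_names = [] then
    [("product_match", 0), ("product_match_top3", 0), ("matched_product_count", 0)]
  else
    let tl := PySem.Chars.lower text_str.toList
    let grams := pvGrams tl
    let keys := product_names.map pvKey
    let hit := keys.map (pvHit grams)
    let matched : Int := hit.foldl (fun a x => a + if x then 1 else 0) 0
    let matched_top3 : Int := if (PySem.List.slice hit none (some 3)).contains true then 1 else 0
    [("product_match", if matched > 0 then 1 else 0),
     ("product_match_top3", matched_top3),
     ("matched_product_count", matched)]

-- ===== PRECONDITION & SPEC =====
def Spec_check_product_in_text (text_str : String) (product_names : List String) (out : List (String × Int)) : Prop := out = check_product_in_text_alt text_str product_names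
instance (text_str : String) (product_names : List String) (out : List (String × Int)) : Decidable (Spec_check_product_in_text text_str product_names out) := by unfold Spec_check_product_in_text; infer_instance

-- ===== CLAIM (what is proved, stated in full; the proofs are below) =====
def Claim_equal_check_product_in_text : Prop := ∀ (text_str : String) (product_names : List String), Dom_check_product_in_text text_str product_names → Spec_check_product_in_text text_str product_names (check_product_in_text text_str product_names)

-- ===== LEMMAS AND PROOFS =====

-- membership in a fold of Set.add
theorem pv_mem_foldl_add {α β : Type} [BEq β] [LawfulBEq β] (l : List α) (f : α → β)
    (g0 : PySem.Set β) (y : β) :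
    y ∈ l.foldl (fun g x => PySem.Set.add g (f x)) g0 ↔ y ∈ g0 ∨ ∃ x ∈ l, f x = y := by
  induction l generalizing g0 with
  | nil => simp
  | cons a l ih =>
    simp only [List.foldl_cons, ih, PySem.Set.mem_add, List.mem_cons]
    constructor
    · rintro (⟨h | h⟩ | ⟨x, hx, hfx⟩)
      · exact Or.inl h
      · exact Or.inr ⟨a, Or.inl rfl, h.symm⟩
      · exact Or.inr ⟨x, Or.inr hx, hfx⟩
    · rintro (h | ⟨x, (rfl | hx), hfx⟩)
      · exact Or.inl (Or.inl h)
      · exact Or.inl (Or.inr hfx.symm)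
      · exact Or.inr ⟨x, hx, hfx⟩

theorem pv_mem_grams_gen (tl y : List Char) (ls : List Int) (g0 : PySem.Set (List Char)) :
    y ∈ ls.foldl (fun g len =>
      (PySem.List.pyRange 0 ((tl.length : Int) - len + 1) 1).foldl (fun g i =>
        PySem.Set.add g (PySem.List.slice tl (some i) (some (i + len)))) g) g0
    ↔ y ∈ g0 ∨ ∃ len ∈ ls, ∃ i ∈ PySem.List.pyRange 0 ((tl.length : Int) - len + 1) 1,
        PySem.List.slice tl (some i) (some (i + len)) = y := by
  induction ls generalizing g0 with
  | nil => simp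
  | cons L ls ih =>
    rw [List.foldl_cons, ih, pv_mem_foldl_add]
    constructor
    · rintro (⟨h | ⟨i, hi, hs⟩⟩ | ⟨len, hlen, hrest⟩)
      · exact Or.inl h
      · exact Or.inr ⟨L, List.mem_cons_self, i, hi, hs⟩
      · exact Or.inr ⟨len, List.mem_cons_of_mem _ hlen, hrest⟩
    · rintro (h | ⟨len, hmem, hrest⟩)
      · exact Or.inl (Or.inl h)
      · rcases List.mem_cons.mp hmem with rfl | hlen
        · exact Or.inl (Or.inr hrest)
        · exact Or.inr ⟨len, hlen, hrest⟩

theorem pv_mem_grams (tl : List Char) (y : List Char) :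
    y ∈ pvGrams tl ↔ ∃ len ∈ PySem.List.pyRange 2 7 1,
      ∃ i ∈ PySem.List.pyRange 0 ((tl.length : Int) - len + 1) 1,
        PySem.List.slice tl (some i) (some (i + len)) = y := by
  unfold pvGrams
  rw [pv_mem_grams_gen]
  simp [PySem.Set.empty]

-- the gram index is exact: a key of length 2..6 is in it iff it is a substring
theorem pv_grams_isIn (tl cs : List Char) (h2 : 2 ≤ cs.length) (h6 : cs.length ≤ 6) :
    cs ∈ pvGrams tl ↔ cs <:+: tl := by
  rw [pv_mem_grams]
  constructor
  · rintro ⟨len, hlen, i, hi, hs⟩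
    rw [PySem.List.mem_pyRange_one] at hlen hi
    have h0i : 0 ≤ i := hi.1
    have h0l : 0 ≤ len := by omega
    rw [PySem.List.slice_toNat tl h0i (by omega)] at hs
    rw [← hs]
    exact ((tl.drop i.toNat).take_prefix _).isInfix.trans (tl.drop_suffix _).isInfix
  · rintro ⟨s, t, rfl⟩
    refine ⟨(cs.length : Int), ?_, (s.length : Int), ?_, ?_⟩
    · rw [PySem.List.mem_pyRange_one]; omega
    · rw [PySem.List.mem_pyRange_one]
      constructor
      · positivity
      · simp only [List.length_append]
        push_cast
        omega
    · rw [PySem.List.slice_natCast_add]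
      simp

-- the stripped lowered 6-slice has length at most 6
theorem pv_key_len_le (name : String) : (pvKey name).length ≤ 6 := by
  unfold pvKey
  simp only [PySem.Chars.strip, PySem.Chars.rstrip, PySem.Chars.lstrip, PySem.Chars.lower,
    PySem.Chars.slice_eq_listSlice]
  have h1 : ∀ (l : List Char), (List.dropWhile PySem.Chars.isspace l).length ≤ l.length :=
    fun l => (List.dropWhile_sublist _).length_le
  calc ((List.dropWhile PySem.Chars.isspace
          ((List.dropWhile PySem.Chars.isspace
            (List.map PySem.Chars.lowerChar (PySem.List.slice name.toList none (some 6)))).reverse)).reverse).length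
      ≤ ((List.dropWhile PySem.Chars.isspace
            (List.map PySem.Chars.lowerChar (PySem.List.slice name.toList none (some 6)))).reverse).length := by
        rw [List.length_reverse]; exact h1 _
    _ ≤ (PySem.List.slice name.toList none (some 6)).length := by
        rw [List.length_reverse]
        exact le_trans (h1 _) (by simp)
    _ ≤ 6 := by
        rw [show ((6:Int)) = ((6:Nat):Int) from rfl, PySem.List.slice_to_natCast]
        exact List.length_take_le 6 name.toList

-- A's per-name test (guard + Prop test on strings) acts exactly as B's Boolean key test
theorem pv_step_eq (t : String) (name : String) (u acc : Int × Int) :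
    (if name = "" then acc
     else
       let short_name := PySem.Str.strip (PySem.Str.lower (PySem.Str.slice name none (some 6)))
       if 2 ≤ PySem.Str.len short_name ∧ PySem.Str.isIn short_name (PySem.Str.lower t) = true
       then u else acc)
    = if pvHit (pvGrams (PySem.Chars.lower t.toList)) (pvKey name) then u else acc := by
  have hkey : (PySem.Str.strip (PySem.Str.lower (PySem.Str.slice name none (some 6)))).toList
      = pvKey name := by
    simp [pvKey, PySem.Str.toList_strip, PySem.Str.toList_lower, PySem.Str.toList_slice]
  have hlen : PySem.Str.len (PySem.Str.strip (PySem.Str.lower (PySem.Str.slice name none (some 6))))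
      = (pvKey name).length := by
    rw [PySem.Str.len_eq, hkey]
  by_cases h0 : name = ""
  · subst h0
    have : pvKey "" = [] := by decide
    simp [this, pvHit]
  · rw [if_neg h0]
    simp only [hlen, pvHit]
    by_cases h2 : 2 ≤ (pvKey name).length
    · have hin : PySem.Str.isIn (PySem.Str.strip (PySem.Str.lower (PySem.Str.slice name none (some 6)))) (PySem.Str.lower t) = true
          ↔ PySem.Set.contains (pvGrams (PySem.Chars.lower t.toList)) (pvKey name) = true := by
        rw [PySem.Str.isIn_iff_infix, hkey, PySem.Str.toList_lower, PySem.Set.contains_iff,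
          pv_grams_isIn _ _ h2 (pv_key_len_le name)]
      have hiff : (2 ≤ ((pvKey name).length : Int) ∧
            PySem.Str.isIn (PySem.Str.strip (PySem.Str.lower (PySem.Str.slice name none (some 6)))) (PySem.Str.lower t) = true)
          ↔ (decide (2 ≤ (pvKey name).length) && PySem.Set.contains (pvGrams (PySem.Chars.lower t.toList)) (pvKey name)) = true := by
        constructor
        · rintro ⟨-, hb⟩
          simp only [Bool.and_eq_true, decide_eq_true_iff]
          exact ⟨h2, hin.mp hb⟩
        · intro hb
          simp only [Bool.and_eq_true, decide_eq_true_iff] at hb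
          exact ⟨by exact_mod_cast hb.1, hin.mpr hb.2⟩
      exact if_congr hiff rfl rfl
    · have h2' : ¬ (2:Int) ≤ ((pvKey name).length : Int) := by exact_mod_cast h2
      simp [h2, h2']

-- A's indexed fold computes (number of hits, flag for a hit among the first 3 - s names)
theorem pv_fold_eq (q : List Char → Bool) (names : List String) (s : Nat) (a b : Int) :
    (PySem.List.enumerate names (s : Int)).foldl
      (fun (acc : Int × Int) p =>
        if q (pvKey p.2) then (acc.1 + 1, if p.1 < 3 then 1 else acc.2) else acc) (a, b)
    = (a + (names.countP (fun n => q (pvKey n)) : Int),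
       if (names.take (3 - s)).any (fun n => q (pvKey n)) then 1 else b) := by
  induction names generalizing s a b with
  | nil => simp [PySem.List.enumerate]
  | cons n rest ih =>
    rw [PySem.List.enumerate_cons, List.foldl_cons]
    have hcast : ((s : Int) + 1) = ((s + 1 : Nat) : Int) := by push_cast; ring
    by_cases hn : q (pvKey n) = true
    · rw [if_pos hn, hcast, ih (s + 1)]
      by_cases hs : s < 3
      · have h3 : 3 - s = (3 - (s + 1)) + 1 := by omega
        have hlt : ((s : Int) < 3) := by exact_mod_cast hs
        rw [if_pos hlt, h3, List.take_succ_cons]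
        simp [hn]
        ring
      · have hge : ¬ ((s : Int) < 3) := by omega
        rw [if_neg hge]
        have h0 : 3 - s = 0 := by omega
        have h0' : 3 - (s + 1) = 0 := by omega
        rw [h0, h0']
        simp [hn]
        ring
    · rw [if_neg hn, hcast, ih (s + 1)]
      have hcount : (n :: rest).countP (fun n => q (pvKey n)) = rest.countP (fun n => q (pvKey n)) := by
        simp [hn]
      rw [hcount]
      by_cases hs : s < 3
      · have h3 : 3 - s = (3 - (s + 1)) + 1 := by omega
        rw [h3, List.take_succ_cons, List.any_cons]
        simp only [Bool.not_eq_true] at hn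
        simp [hn]
      · have h0 : 3 - s = 0 := by omega
        have h0' : 3 - (s + 1) = 0 := by omega
        rw [h0, h0']
        simp

-- sum of mapped booleans is a count
theorem pv_sum_bools {α : Type} (l : List α) (p : α → Bool) (a : Int) :
    (l.map p).foldl (fun a x => a + if x then 1 else 0) a = a + (l.countP p : Int) := by
  induction l generalizing a with
  | nil => simp
  | cons x l ih =>
    by_cases hx : p x = true
    · simp [ih, hx]; ring
    · simp [ih, hx]

-- True in mapped booleans is an any
theorem pv_contains_true {α : Type} (l : List α) (p : α → Bool) :
    (l.map p).contains true = l.any p := by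
  induction l with
  | nil => simp
  | cons x l ih =>
    rw [List.map_cons, List.contains_cons, List.any_cons, ih]
    cases hpx : p x <;> simp

-- ===== VERDICT (by name: the statement is the Claim_ definition above) =====
theorem check_product_in_text_spec : Claim_equal_check_product_in_text := by
  intro t names _
  show check_product_in_text t names = check_product_in_text_alt t names
  by_cases h : t = "" ∨ names = []
  · simp [check_product_in_text, check_product_in_text_alt, h]
  · simp only [check_product_in_text, check_product_in_text_alt, if_neg h]
    have hA : (PySem.List.enumerate names 0).foldl
        (fun (acc : Int × Int) p =>
          if p.2 = "" then acc
          else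
            let short_name := PySem.Str.strip (PySem.Str.lower (PySem.Str.slice p.2 none (some 6)))
            if 2 ≤ PySem.Str.len short_name ∧ PySem.Str.isIn short_name (PySem.Str.lower t) = true then
              (acc.1 + 1, if p.1 < 3 then 1 else acc.2)
            else acc) (0, 0)
      = (PySem.List.enumerate names 0).foldl
        (fun (acc : Int × Int) p =>
          if pvHit (pvGrams (PySem.Chars.lower t.toList)) (pvKey p.2) then
            (acc.1 + 1, if p.1 < 3 then 1 else acc.2)
          else acc) (0, 0) := by
      apply PySem.List.foldl_congr_mem
      intro b x _
      exact pv_step_eq t x.2 (b.1 + 1, if x.1 < 3 then 1 else b.2) b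
    rw [hA]
    have hfold := pv_fold_eq (pvHit (pvGrams (PySem.Chars.lower t.toList))) names 0 0 0
    simp only [Nat.cast_zero, zero_add, Nat.sub_zero] at hfold
    rw [hfold]
    have hslice : PySem.List.slice ((names.map pvKey).map (pvHit (pvGrams (PySem.Chars.lower t.toList)))) none (some (3 : Int))
        = (names.take 3).map (fun n => pvHit (pvGrams (PySem.Chars.lower t.toList)) (pvKey n)) := by
      rw [show ((3:Int)) = ((3:Nat):Int) from rfl, PySem.List.slice_to_natCast,
        List.map_map, List.map_take]
      rfl
    rw [hslice, pv_contains_true, List.map_map, pv_sum_bools]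
    simp only [Function.comp_def, zero_add]
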